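-- pv_equiv track=rewrite | github.com/rajvermacas/talk-2-tables | fastapi_server/multi_server_intent_detector.py | _convert_natural_language_to_sql
-- ===== SOURCE A (Python) =====
-- from typing import Dict, List, Optional, Any, Tuple, Set
--
-- def _convert_natural_language_to_sql(query: str) -> Optional[str]:
--     """Convert natural language to SQL query."""
--     query_lower = query.lower().strip()
--
--     # Simple pattern matching for common queries
--     if any(phrase in query_lower for phrase in ['show all', 'list all', 'get all']):
--         if 'product' in query_lower:
--             # This should actually be handled by product metadata server
--             return None  # Signal that this should be re-routed
--         elif 'sale' in query_lower:
--             return "SELECT * FROM sales ORDER BY sale_date DESC LIMIT 100"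
--         elif 'customer' in query_lower:
--             return "SELECT * FROM customers LIMIT 100"
--         elif 'data' in query_lower or 'record' in query_lower:
--             return "SELECT * FROM sales LIMIT 100"
--
--     elif 'count' in query_lower:
--         if 'sale' in query_lower:
--             return "SELECT COUNT(*) as total_sales FROM sales"
--         elif 'customer' in query_lower:
--             return "SELECT COUNT(*) as total_customers FROM customers"
--         elif 'product' in query_lower:
--             return "SELECT COUNT(*) as total_products FROM products"
--
--     elif any(phrase in query_lower for phrase in ['total sales', 'sales total', 'revenue']):
--         return "SELECT SUM(amount) as total_revenue FROM sales"
--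
--     # If we can't convert, return None to signal re-routing
--     return None
-- ===== SOURCE B (Python) =====
-- # Generate-and-select: collect all candidate rules matched anywhere in the query,
-- # then pick the winner by minimal (group, rank) priority instead of branching.
-- _TRIGGERS = [
--     (0, 'show all'), (0, 'list all'), (0, 'get all'),
--     (1, 'count'),
--     (2, 'total sales'), (2, 'sales total'), (2, 'revenue'),
-- ]
--
-- _CANDIDATES = [
--     (0, 0, 'product', None),
--     (0, 1, 'sale', "SELECT * FROM sales ORDER BY sale_date DESC LIMIT 100"),
--     (0, 2, 'customer', "SELECT * FROM customers LIMIT 100"),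
--     (0, 3, 'data', "SELECT * FROM sales LIMIT 100"),
--     (0, 4, 'record', "SELECT * FROM sales LIMIT 100"),
--     (1, 0, 'sale', "SELECT COUNT(*) as total_sales FROM sales"),
--     (1, 1, 'customer', "SELECT COUNT(*) as total_customers FROM customers"),
--     (1, 2, 'product', "SELECT COUNT(*) as total_products FROM products"),
--     (2, 0, '', "SELECT SUM(amount) as total_revenue FROM sales"),
-- ]
--
-- def _convert_natural_language_to_sql(query):
--     q = query.lower().strip()
--     groups = [g for g, t in _TRIGGERS if t in q]
--     if not groups:
--         return None
--     g = min(groups)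
--     hits = [(r, sql) for gg, r, kw, sql in _CANDIDATES if gg == g and kw in q]
--     if not hits:
--         return None
--     return min(hits, key=lambda h: h[0])[1]
-- ===== Notes on version B (the rewrite author's own statement) =====
-- stated objective: alternative
-- what changed: Branch-and-test is replaced by generate-and-select: all trigger groups matching the query are collected and the minimal group index chosen, then all matching keyword candidates of that group are collected and the one with minimal rank wins, reproducing the elif precedence and consume semantics via priority minimisation instead of ordered branching.
import Mathlib
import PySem

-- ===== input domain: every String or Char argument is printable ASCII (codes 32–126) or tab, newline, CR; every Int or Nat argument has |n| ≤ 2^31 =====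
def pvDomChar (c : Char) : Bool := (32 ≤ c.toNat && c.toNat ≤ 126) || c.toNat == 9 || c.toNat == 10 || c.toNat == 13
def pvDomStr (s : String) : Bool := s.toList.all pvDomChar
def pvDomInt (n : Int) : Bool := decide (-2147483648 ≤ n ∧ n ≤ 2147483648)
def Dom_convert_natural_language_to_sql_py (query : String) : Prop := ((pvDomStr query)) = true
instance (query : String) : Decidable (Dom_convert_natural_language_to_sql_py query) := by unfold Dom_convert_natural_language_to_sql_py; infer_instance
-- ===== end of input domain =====

-- B replaces A's nested if/elif branching by generate-and-select: collect all matched candidates, pick the minimal-priority one (objective: alternative).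
-- ===== PORT A =====
-- Literal port of A's nested if/elif chain.
def convert_natural_language_to_sql_py (query : String) : Option String :=
  let ql := PySem.Str.strip (PySem.Str.lower query)
  if (["show all", "list all", "get all"].any (fun p => PySem.Str.isIn p ql)) then
    if PySem.Str.isIn "product" ql then none
    else if PySem.Str.isIn "sale" ql then some "SELECT * FROM sales ORDER BY sale_date DESC LIMIT 100"
    else if PySem.Str.isIn "customer" ql then some "SELECT * FROM customers LIMIT 100"
    else if (PySem.Str.isIn "data" ql || PySem.Str.isIn "record" ql) then some "SELECT * FROM sales LIMIT 100"
    else none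
  else if PySem.Str.isIn "count" ql then
    if PySem.Str.isIn "sale" ql then some "SELECT COUNT(*) as total_sales FROM sales"
    else if PySem.Str.isIn "customer" ql then some "SELECT COUNT(*) as total_customers FROM customers"
    else if PySem.Str.isIn "product" ql then some "SELECT COUNT(*) as total_products FROM products"
    else none
  else if (["total sales", "sales total", "revenue"].any (fun p => PySem.Str.isIn p ql)) then
    some "SELECT SUM(amount) as total_revenue FROM sales"
  else none

-- ===== PORT B =====
-- Source B's _TRIGGERS table: (group priority, trigger phrase)
def pvTriggers : List (Int × String) :=
  [(0, "show all"), (0, "list all"), (0, "get all"),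
   (1, "count"),
   (2, "total sales"), (2, "sales total"), (2, "revenue")]

-- Source B's _CANDIDATES table: (group, rank, keyword, sql)
def pvCandidates : List (Int × Int × String × Option String) :=
  [(0, 0, "product", none),
   (0, 1, "sale", some "SELECT * FROM sales ORDER BY sale_date DESC LIMIT 100"),
   (0, 2, "customer", some "SELECT * FROM customers LIMIT 100"),
   (0, 3, "data", some "SELECT * FROM sales LIMIT 100"),
   (0, 4, "record", some "SELECT * FROM sales LIMIT 100"),
   (1, 0, "sale", some "SELECT COUNT(*) as total_sales FROM sales"),
   (1, 1, "customer", some "SELECT COUNT(*) as total_customers FROM customers"),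
   (1, 2, "product", some "SELECT COUNT(*) as total_products FROM products"),
   (2, 0, "", some "SELECT SUM(amount) as total_revenue FROM sales")]

-- comprehension [g for g, t in _TRIGGERS if t in q]
def pvMatchedGroups (q : String) : List (Int × String) → List Int
  | [] => []
  | (g, t) :: rest => if PySem.Str.isIn t q then g :: pvMatchedGroups q rest else pvMatchedGroups q rest

-- comprehension [(r, sql) for gg, r, kw, sql in _CANDIDATES if gg == g and kw in q]
def pvMatchedHits (q : String) (g : Int) : List (Int × Int × String × Option String) → List (Int × Option String)
  | [] => []
  | (gg, r, kw, sql) :: rest =>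
    if gg == g && PySem.Str.isIn kw q then (r, sql) :: pvMatchedHits q g rest
    else pvMatchedHits q g rest

-- B: generate all matched trigger groups, take min(groups); generate that group's matched
-- candidates, return the sql of min(hits, key=rank).
def convert_natural_language_to_sql_py_alt (query : String) : Option String :=
  let q := PySem.Str.strip (PySem.Str.lower query)
  match PySem.List.min? (pvMatchedGroups q pvTriggers) (fun x => x) with
  | none => none
  | some g =>
    match PySem.List.min? (pvMatchedHits q g pvCandidates) (fun h => h.1) with
    | none => none
    | some h => h.2

-- ===== PRECONDITION & SPEC =====
def Spec_convert_natural_language_to_sql_py (query : String) (out : Option String) : Prop := out = convert_natural_language_to_sql_py_alt query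
instance (query : String) (out : Option String) : Decidable (Spec_convert_natural_language_to_sql_py query out) := by unfold Spec_convert_natural_language_to_sql_py; infer_instance

-- ===== CLAIM (what is proved, stated in full; the proofs are below) =====
def Claim_equal_convert_natural_language_to_sql_py : Prop := ∀ (query : String), Dom_convert_natural_language_to_sql_py query → Spec_convert_natural_language_to_sql_py query (convert_natural_language_to_sql_py query)

-- ===== LEMMAS AND PROOFS =====

-- Bool-abstracted twins of B's comprehension helpers (the substring tests replaced by Bools).
def pvMatchedGroupsB : List (Int × Bool) → List Int
  | [] => []
  | (g, t) :: rest => if t then g :: pvMatchedGroupsB rest else pvMatchedGroupsB rest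

def pvMatchedHitsB (g : Int) : List (Int × Int × Bool × Option String) → List (Int × Option String)
  | [] => []
  | (gg, r, kw, sql) :: rest =>
    if gg == g && kw then (r, sql) :: pvMatchedHitsB g rest
    else pvMatchedHitsB g rest

-- A's decision abstracted over the 12 substring-test atoms (definitionally equal to port A's body).
def pvA (t1 t2 t3 t4 t5 t6 t7 t8 t9 t10 t11 t12 : Bool) : Option String :=
  if (t1 || (t2 || (t3 || false))) then
    if t8 then none
    else if t9 then some "SELECT * FROM sales ORDER BY sale_date DESC LIMIT 100"
    else if t10 then some "SELECT * FROM customers LIMIT 100"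
    else if (t11 || t12) then some "SELECT * FROM sales LIMIT 100"
    else none
  else if t4 then
    if t9 then some "SELECT COUNT(*) as total_sales FROM sales"
    else if t10 then some "SELECT COUNT(*) as total_customers FROM customers"
    else if t8 then some "SELECT COUNT(*) as total_products FROM products"
    else none
  else if (t5 || (t6 || (t7 || false))) then
    some "SELECT SUM(amount) as total_revenue FROM sales"
  else none

-- B's decision abstracted over the same atoms plus t13, the (always-true) '"" in q' test.
def pvB (t1 t2 t3 t4 t5 t6 t7 t8 t9 t10 t11 t12 t13 : Bool) : Option String :=
  match PySem.List.min? (pvMatchedGroupsB [(0, t1), (0, t2), (0, t3), (1, t4), (2, t5), (2, t6), (2, t7)]) (fun x => x) with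
  | none => none
  | some g =>
    match PySem.List.min? (pvMatchedHitsB g
        [(0, 0, t8, none), (0, 1, t9, some "SELECT * FROM sales ORDER BY sale_date DESC LIMIT 100"),
         (0, 2, t10, some "SELECT * FROM customers LIMIT 100"),
         (0, 3, t11, some "SELECT * FROM sales LIMIT 100"),
         (0, 4, t12, some "SELECT * FROM sales LIMIT 100"),
         (1, 0, t9, some "SELECT COUNT(*) as total_sales FROM sales"),
         (1, 1, t10, some "SELECT COUNT(*) as total_customers FROM customers"),
         (1, 2, t8, some "SELECT COUNT(*) as total_products FROM products"),
         (2, 0, t13, some "SELECT SUM(amount) as total_revenue FROM sales")]) (fun h => h.1) with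
    | none => none
    | some h => h.2

-- The finite heart of the equivalence, decided over all atom assignments.
theorem pv_AB (t1 t2 t3 t4 t5 t6 t7 t8 t9 t10 t11 t12 t13 : Bool) (h : t13 = true) :
    pvA t1 t2 t3 t4 t5 t6 t7 t8 t9 t10 t11 t12 =
      pvB t1 t2 t3 t4 t5 t6 t7 t8 t9 t10 t11 t12 t13 := by
  subst h
  revert t1 t2 t3 t4 t5 t6 t7 t8 t9 t10 t11 t12
  decide

theorem groups_eq (q : String) : pvMatchedGroups q pvTriggers =
    pvMatchedGroupsB
      [(0, PySem.Str.isIn "show all" q), (0, PySem.Str.isIn "list all" q), (0, PySem.Str.isIn "get all" q),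
       (1, PySem.Str.isIn "count" q),
       (2, PySem.Str.isIn "total sales" q), (2, PySem.Str.isIn "sales total" q), (2, PySem.Str.isIn "revenue" q)] := rfl

theorem hits_eq (q : String) (g : Int) : pvMatchedHits q g pvCandidates =
    pvMatchedHitsB g
      [(0, 0, PySem.Str.isIn "product" q, none),
       (0, 1, PySem.Str.isIn "sale" q, some "SELECT * FROM sales ORDER BY sale_date DESC LIMIT 100"),
       (0, 2, PySem.Str.isIn "customer" q, some "SELECT * FROM customers LIMIT 100"),
       (0, 3, PySem.Str.isIn "data" q, some "SELECT * FROM sales LIMIT 100"),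
       (0, 4, PySem.Str.isIn "record" q, some "SELECT * FROM sales LIMIT 100"),
       (1, 0, PySem.Str.isIn "sale" q, some "SELECT COUNT(*) as total_sales FROM sales"),
       (1, 1, PySem.Str.isIn "customer" q, some "SELECT COUNT(*) as total_customers FROM customers"),
       (1, 2, PySem.Str.isIn "product" q, some "SELECT COUNT(*) as total_products FROM products"),
       (2, 0, PySem.Str.isIn "" q, some "SELECT SUM(amount) as total_revenue FROM sales")] := rfl

theorem pv_A_abs (q : String) :
    convert_natural_language_to_sql_py q = pvA
        (PySem.Str.isIn "show all" (PySem.Str.strip (PySem.Str.lower q)))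
        (PySem.Str.isIn "list all" (PySem.Str.strip (PySem.Str.lower q)))
        (PySem.Str.isIn "get all" (PySem.Str.strip (PySem.Str.lower q)))
        (PySem.Str.isIn "count" (PySem.Str.strip (PySem.Str.lower q)))
        (PySem.Str.isIn "total sales" (PySem.Str.strip (PySem.Str.lower q)))
        (PySem.Str.isIn "sales total" (PySem.Str.strip (PySem.Str.lower q)))
        (PySem.Str.isIn "revenue" (PySem.Str.strip (PySem.Str.lower q)))
        (PySem.Str.isIn "product" (PySem.Str.strip (PySem.Str.lower q)))
        (PySem.Str.isIn "sale" (PySem.Str.strip (PySem.Str.lower q)))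
        (PySem.Str.isIn "customer" (PySem.Str.strip (PySem.Str.lower q)))
        (PySem.Str.isIn "data" (PySem.Str.strip (PySem.Str.lower q)))
        (PySem.Str.isIn "record" (PySem.Str.strip (PySem.Str.lower q))) := rfl

theorem pv_B_abs (q : String) :
    convert_natural_language_to_sql_py_alt q = pvB
        (PySem.Str.isIn "show all" (PySem.Str.strip (PySem.Str.lower q)))
        (PySem.Str.isIn "list all" (PySem.Str.strip (PySem.Str.lower q)))
        (PySem.Str.isIn "get all" (PySem.Str.strip (PySem.Str.lower q)))
        (PySem.Str.isIn "count" (PySem.Str.strip (PySem.Str.lower q)))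
        (PySem.Str.isIn "total sales" (PySem.Str.strip (PySem.Str.lower q)))
        (PySem.Str.isIn "sales total" (PySem.Str.strip (PySem.Str.lower q)))
        (PySem.Str.isIn "revenue" (PySem.Str.strip (PySem.Str.lower q)))
        (PySem.Str.isIn "product" (PySem.Str.strip (PySem.Str.lower q)))
        (PySem.Str.isIn "sale" (PySem.Str.strip (PySem.Str.lower q)))
        (PySem.Str.isIn "customer" (PySem.Str.strip (PySem.Str.lower q)))
        (PySem.Str.isIn "data" (PySem.Str.strip (PySem.Str.lower q)))
        (PySem.Str.isIn "record" (PySem.Str.strip (PySem.Str.lower q)))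
        (PySem.Str.isIn "" (PySem.Str.strip (PySem.Str.lower q))) := by
  unfold convert_natural_language_to_sql_py_alt pvB
  simp only [groups_eq, hits_eq]

-- ===== VERDICT (by name: the statement is the Claim_ definition above) =====
theorem convert_natural_language_to_sql_py_spec : Claim_equal_convert_natural_language_to_sql_py := by
  intro query _
  unfold Spec_convert_natural_language_to_sql_py
  rw [pv_A_abs query, pv_B_abs query]
  exact pv_AB _ _ _ _ _ _ _ _ _ _ _ _ _ (by simp)
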